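-- pv_equiv track=rewrite | github.com/KajGwo/arrs | 3.31.py | find_smallest_largest
-- ===== SOURCE A (Python) =====
-- def find_smallest_largest(array):
--     min_value = int()
--     max_value = int()
--     min_position = (-1, -1)
--     max_position = (-1, -1)
--
--     for row_idx, row in enumerate(array):
--         for col_idx, value in enumerate(row):
--             if value < min_value:
--                 min_value = value
--                 min_position = (row_idx, col_idx)
--             if value > max_value:
--                 max_value = value
--                 max_position = (row_idx, col_idx)
--
--     return min_value, max_value, min_position, max_position
-- ===== SOURCE B (Python) =====
-- def find_smallest_largest(array):
--     cells = [(i, j, v) for i, row in enumerate(array) for j, v in enumerate(row)]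
--
--     def best(better):
--         value, pos = 0, (-1, -1)
--         for i, j, v in cells:
--             if better(v, value):
--                 value, pos = v, (i, j)
--         return value, pos
--
--     min_value, min_position = best(lambda a, b: a < b)
--     max_value, max_position = best(lambda a, b: a > b)
--     return min_value, max_value, min_position, max_position
-- ===== Notes on version B (the rewrite author's own statement) =====
-- stated objective: alternative
-- what changed: B flattens the matrix once into an (row,col,value) cell list and computes min and max in two separate independent passes through one parameterised helper, instead of A's single combined nested-loop pass carrying both extrema.
import Mathlib
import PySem

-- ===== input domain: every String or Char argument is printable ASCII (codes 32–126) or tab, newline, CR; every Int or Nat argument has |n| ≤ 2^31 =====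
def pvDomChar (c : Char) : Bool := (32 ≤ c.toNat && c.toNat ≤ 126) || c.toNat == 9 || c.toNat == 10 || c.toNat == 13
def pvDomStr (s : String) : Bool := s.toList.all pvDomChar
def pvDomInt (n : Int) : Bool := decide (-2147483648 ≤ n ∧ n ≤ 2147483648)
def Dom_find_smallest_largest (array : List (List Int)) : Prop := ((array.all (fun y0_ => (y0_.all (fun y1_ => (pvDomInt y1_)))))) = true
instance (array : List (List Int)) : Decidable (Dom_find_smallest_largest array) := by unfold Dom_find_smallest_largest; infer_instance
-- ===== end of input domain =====

-- B flattens the matrix once into (row, col, value) cells and runs two separate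
-- passes (min, max) through one parameterised helper, instead of A's single
-- combined nested-loop pass; same results, alternative decomposition.

-- ===== PORT A =====
def find_smallest_largest (array : List (List Int)) : Int × Int × (Int × Int) × (Int × Int) :=
  (PySem.List.enumerate array 0).foldl (fun st p =>
    (PySem.List.enumerate p.2 0).foldl (fun st q =>
      let st1 := if q.2 < st.1 then (q.2, st.2.1, (p.1, q.1), st.2.2.2) else st
      if q.2 > st1.2.1 then (st1.1, q.2, st1.2.2.1, (p.1, q.1)) else st1) st)
    ((0 : Int), (0 : Int), ((-1 : Int), (-1 : Int)), ((-1 : Int), (-1 : Int)))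

-- ===== PORT B =====
def pvCells (array : List (List Int)) : List (Int × Int × Int) :=
  (PySem.List.enumerate array 0).flatMap (fun p =>
    (PySem.List.enumerate p.2 0).map (fun q => (p.1, q.1, q.2)))

def pvBest (cells : List (Int × Int × Int)) (better : Int → Int → Bool) : Int × (Int × Int) :=
  cells.foldl (fun st c => if better c.2.2 st.1 then (c.2.2, (c.1, c.2.1)) else st)
    ((0 : Int), ((-1 : Int), (-1 : Int)))

def find_smallest_largest_alt (array : List (List Int)) : Int × Int × (Int × Int) × (Int × Int) :=
  let cells := pvCells array
  let mn := pvBest cells (fun a b => a < b)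
  let mx := pvBest cells (fun a b => a > b)
  (mn.1, mx.1, mn.2, mx.2)

-- ===== PRECONDITION & SPEC =====
def Spec_find_smallest_largest (array : List (List Int)) (out : Int × Int × (Int × Int) × (Int × Int)) : Prop := out = find_smallest_largest_alt array
instance (array : List (List Int)) (out : Int × Int × (Int × Int) × (Int × Int)) : Decidable (Spec_find_smallest_largest array out) := by unfold Spec_find_smallest_largest; infer_instance

-- ===== CLAIM (what is proved, stated in full; the proofs are below) =====
def Claim_equal_find_smallest_largest : Prop := ∀ (array : List (List Int)), Dom_find_smallest_largest array → Spec_find_smallest_largest array (find_smallest_largest array)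

-- ===== LEMMAS AND PROOFS =====

-- A's combined step, written over a flattened cell
def pvStepAB (st : Int × Int × (Int × Int) × (Int × Int)) (c : Int × Int × Int) :
    Int × Int × (Int × Int) × (Int × Int) :=
  let st1 := if c.2.2 < st.1 then (c.2.2, st.2.1, (c.1, c.2.1), st.2.2.2) else st
  if c.2.2 > st1.2.1 then (st1.1, c.2.2, st1.2.2.1, (c.1, c.2.1)) else st1

-- the min-only and max-only steps (the fold bodies of pvBest at B's two comparators)
def pvStepMin (st : Int × (Int × Int)) (c : Int × Int × Int) : Int × (Int × Int) :=
  if decide (c.2.2 < st.1) then (c.2.2, (c.1, c.2.1)) else st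
def pvStepMax (st : Int × (Int × Int)) (c : Int × Int × Int) : Int × (Int × Int) :=
  if decide (c.2.2 > st.1) then (c.2.2, (c.1, c.2.1)) else st

-- A's nested fold is the fold of the combined step over the flattened cells
theorem pvA_eq_cells_fold (array : List (List Int)) :
    find_smallest_largest array =
      (pvCells array).foldl pvStepAB
        ((0 : Int), (0 : Int), ((-1 : Int), (-1 : Int)), ((-1 : Int), (-1 : Int))) := by
  unfold find_smallest_largest pvCells
  rw [List.foldl_flatMap]
  apply PySem.List.foldl_congr_mem
  intro st p _
  rw [List.foldl_map]
  rfl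

-- one combined step = the two independent steps, componentwise
theorem pvstep_eq (s1 s2 : Int × (Int × Int)) (c : Int × Int × Int) :
    pvStepAB (s1.1, s2.1, s1.2, s2.2) c =
      ((pvStepMin s1 c).1, (pvStepMax s2 c).1, (pvStepMin s1 c).2, (pvStepMax s2 c).2) := by
  simp only [pvStepAB, pvStepMin, pvStepMax, gt_iff_lt, decide_eq_true_eq]
  split_ifs <;> rfl

-- the combined fold splits into the two independent single-purpose folds
theorem pvfold_split (cells : List (Int × Int × Int)) :
    ∀ (s1 s2 : Int × (Int × Int)),
      cells.foldl pvStepAB (s1.1, s2.1, s1.2, s2.2) =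
        ((cells.foldl pvStepMin s1).1, (cells.foldl pvStepMax s2).1,
         (cells.foldl pvStepMin s1).2, (cells.foldl pvStepMax s2).2) := by
  induction cells with
  | nil => intro s1 s2; rfl
  | cons c t ih =>
      intro s1 s2
      simp only [List.foldl_cons, pvstep_eq s1 s2 c]
      exact ih (pvStepMin s1 c) (pvStepMax s2 c)

-- ===== VERDICT (by name: the statement is the Claim_ definition above) =====
theorem find_smallest_largest_spec : Claim_equal_find_smallest_largest := by
  intro array _
  show find_smallest_largest array = find_smallest_largest_alt array
  have h1 : pvBest (pvCells array) (fun a b => a < b) =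
      (pvCells array).foldl pvStepMin ((0 : Int), ((-1 : Int), (-1 : Int))) := rfl
  have h2 : pvBest (pvCells array) (fun a b => a > b) =
      (pvCells array).foldl pvStepMax ((0 : Int), ((-1 : Int), (-1 : Int))) := rfl
  rw [pvA_eq_cells_fold]
  show _ = (_, _, _, _)
  rw [h1, h2]
  exact pvfold_split (pvCells array) ((0 : Int), ((-1 : Int), (-1 : Int)))
    ((0 : Int), ((-1 : Int), (-1 : Int)))
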